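-- pv_equiv track=rewrite | github.com/abdullahshamail/SSTD-23 | utilities.py | getAtomType
-- ===== SOURCE A (Python) =====
-- def getAtomType(index):
--     atomTypes = {
--                 "hn": [0, 216],
--                  "n": [216, 432],
--                  "o": [432, 442],
--                  "os": [442, 452],
--                  }
--     for atom, range in atomTypes.items():
--         if index >= range[0] and index < range[1]:
--             return atom
--
--     return "none"
-- ===== SOURCE B (Python) =====
-- def getAtomType(index):
--     boundaries = [0, 216, 432, 442, 452]
--     labels = ["none", "hn", "n", "o", "os"]
--     lo, hi = 0, 5
--     while lo < hi:
--         mid = (lo + hi) // 2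
--         if index < boundaries[mid]:
--             hi = mid
--         else:
--             lo = mid + 1
--     if lo == 0 or lo == 5:
--         return "none"
--     return labels[lo]
-- ===== Notes on version B (the rewrite author's own statement) =====
-- stated objective: alternative
-- what changed: Replaced the linear scan over the dict of (label, [lo,hi]) ranges by a hand-written binary search (bisect_right) over the sorted boundary table [0,216,432,442,452] with a parallel label table.
import Mathlib
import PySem

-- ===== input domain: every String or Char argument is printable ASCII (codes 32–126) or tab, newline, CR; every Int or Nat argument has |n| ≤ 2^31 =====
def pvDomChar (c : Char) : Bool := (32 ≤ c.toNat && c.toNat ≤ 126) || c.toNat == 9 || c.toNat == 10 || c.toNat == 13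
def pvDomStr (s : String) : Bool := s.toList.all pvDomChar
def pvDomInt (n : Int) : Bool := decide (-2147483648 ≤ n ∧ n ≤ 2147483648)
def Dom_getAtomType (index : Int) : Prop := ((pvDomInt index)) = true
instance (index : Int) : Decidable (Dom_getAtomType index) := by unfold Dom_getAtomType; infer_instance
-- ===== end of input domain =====

-- B replaces A's linear scan over labelled ranges by a binary search over a sorted boundary table (alternative algorithm; return value only, no side effects).


-- ===== PORT A =====
-- the for-loop over atomTypes.items() with early return
def getAtomTypeLoop (index : Int) : List (String × List Int) → String
  | [] => "none"
  | (atom, r) :: rest =>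
    if (PySem.List.pyGet? r 0).getD 0 ≤ index ∧ index < (PySem.List.pyGet? r 1).getD 0 then
      atom
    else
      getAtomTypeLoop index rest

def getAtomType (index : Int) : String :=
  let atomTypes : List (String × List Int) :=
    [("hn", [0, 216]), ("n", [216, 432]), ("o", [432, 442]), ("os", [442, 452])]
  getAtomTypeLoop index atomTypes

-- ===== PORT B =====
-- the while-loop of Source B: bisect_right binary search; terminates since hi - lo shrinks
def bisectLoop (index : Int) (boundaries : List Int) (lo hi : Int) : Int :=
  if h : lo < hi then
    let mid := PySem.Int.floordiv (lo + hi) 2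
    if index < (PySem.List.pyGet? boundaries mid).getD 0 then
      bisectLoop index boundaries lo mid
    else
      bisectLoop index boundaries (mid + 1) hi
  else lo
termination_by (hi - lo).toNat
decreasing_by
  · have h2 : PySem.Int.floordiv (lo + hi) 2 < hi := by
      rw [PySem.Int.floordiv_lt_iff_lt_mul (by omega)]; omega
    omega
  · have h2 : lo ≤ PySem.Int.floordiv (lo + hi) 2 := by
      rw [PySem.Int.le_floordiv_iff_mul_le (by omega)]; omega
    omega

def getAtomType_alt (index : Int) : String :=
  let boundaries : List Int := [0, 216, 432, 442, 452]
  let labels : List String := ["none", "hn", "n", "o", "os"]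
  let lo := bisectLoop index boundaries 0 5
  if lo = 0 ∨ lo = 5 then "none"
  else (PySem.List.pyGet? labels lo).getD ""

-- ===== PRECONDITION & SPEC =====
def Spec_getAtomType (index : Int) (out : String) : Prop := out = getAtomType_alt index
instance (index : Int) (out : String) : Decidable (Spec_getAtomType index out) := by unfold Spec_getAtomType; infer_instance

-- ===== CLAIM (what is proved, stated in full; the proofs are below) =====
def Claim_equal_getAtomType : Prop := ∀ (index : Int), Dom_getAtomType index → Spec_getAtomType index (getAtomType index)

-- ===== LEMMAS AND PROOFS =====

-- the binary search over the literal boundary table computes bisect_right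
theorem bisect_val (index : Int) : bisectLoop index [0, 216, 432, 442, 452] 0 5 =
    (if index < 0 then 0 else if index < 216 then 1 else if index < 432 then 2
     else if index < 442 then 3 else if index < 452 then 4 else 5 : Int) := by
  rw [bisectLoop.eq_def]
  norm_num [PySem.Int.floordiv_eq_ediv_of_pos, PySem.List.pyGet?, PySem.List.pyIdx?]
  split_ifs <;>
    (repeat (first
      | rfl
      | omega
      | (rw [bisectLoop.eq_def];
         norm_num [PySem.Int.floordiv_eq_ediv_of_pos, PySem.List.pyGet?, PySem.List.pyIdx?])
      | split_ifs)) <;>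
    simp_all [show Int.toNat 2 = 2 from rfl, show Int.toNat 3 = 3 from rfl,
      show Int.toNat 4 = 4 from rfl, List.getElem_cons_succ, List.getElem_cons_zero] <;>
    omega

-- ===== VERDICT (by name: the statement is the Claim_ definition above) =====
theorem getAtomType_spec : Claim_equal_getAtomType := by
  intro index _
  unfold Spec_getAtomType
  simp only [getAtomType_alt, bisect_val]
  unfold getAtomType getAtomTypeLoop
  split_ifs <;>
    simp_all [PySem.List.pyGet?, PySem.List.pyIdx?, getAtomTypeLoop] <;>
    split_ifs <;> first | rfl | omega
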